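-- pv_equiv track=rewrite | github.com/AnhTran1610/codility | x_y_split/x_y_split.py | solution
-- ===== SOURCE A (Python) =====
-- def solution(S):
--     counter = 0
--     x = 0
--     y = 0
--     indexes = {}
--
--     # Forward iteration through the string
--     for i in range(len(S) - 1):
--         if S[i] == 'x':
--             x += 1
--         if S[i] == 'y':
--             y += 1
--         if x == y:
--             # If the count of 'x' equals the count of 'y', mark the index and increment the counter
--             indexes[i + 1] = True
--             counter += 1
--
--     # Reset counts for backward iteration
--     x = 0
--     y = 0
--     counter1 = 0
--
--     # Backward iteration through the string
--     for i in range(len(S) - 1, 0, -1):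
--         if S[i] == 'x':
--             x += 1
--         if S[i] == 'y':
--             y += 1
--         if x == y and i not in indexes:
--             # If the count of 'x' equals the count of 'y' and the index is not marked, increment the counter1
--             counter1 += 1
--
--     # Return the sum of the two counters
--     return counter + counter1
-- ===== SOURCE B (Python) =====
-- def solution(S):
--     total_x = S.count('x')
--     total_y = S.count('y')
--     px = py = 0
--     counter = 0
--     for i in range(1, len(S)):
--         ch = S[i - 1]
--         if ch == 'x':
--             px += 1
--         elif ch == 'y':
--             py += 1
--         if px == py or total_x - px == total_y - py:
--             counter += 1
--     return counter
-- ===== Notes on version B (the rewrite author's own statement) =====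
-- stated objective: simpler
-- what changed: Replaced A's two passes (a forward pass marking balanced prefixes in a dict, then a backward pass re-counting balanced suffixes not already marked) by a single forward pass that precomputes the total x/y counts once and counts split points where the prefix or the derived suffix is balanced; the marking dict disappears.
import Mathlib
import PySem

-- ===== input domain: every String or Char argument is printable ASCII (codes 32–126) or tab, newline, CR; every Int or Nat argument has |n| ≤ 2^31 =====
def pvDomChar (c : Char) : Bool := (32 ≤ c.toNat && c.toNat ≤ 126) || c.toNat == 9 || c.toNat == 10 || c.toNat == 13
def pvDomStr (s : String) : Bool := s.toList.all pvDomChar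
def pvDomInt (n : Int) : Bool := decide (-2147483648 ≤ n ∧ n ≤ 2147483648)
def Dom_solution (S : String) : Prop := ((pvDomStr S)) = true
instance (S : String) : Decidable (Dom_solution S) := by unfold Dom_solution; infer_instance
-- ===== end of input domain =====

-- B replaces A's two passes (forward pass marking balanced prefixes in a dict, backward pass
-- counting balanced suffixes not already marked) by a single forward pass that precomputes the
-- total x/y counts; objective: simpler (same O(n) cost). Return values only; neither mutates.

-- ===== PORT A =====
-- forward loop state: (counter, x, y, indexes)
def solFwdStep (cs : List Char) (st : Int × Int × Int × PySem.Dict Int Bool) (i : Int) :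
    Int × Int × Int × PySem.Dict Int Bool :=
  let x := if PySem.List.pyGet? cs i = some 'x' then st.2.1 + 1 else st.2.1
  let y := if PySem.List.pyGet? cs i = some 'y' then st.2.2.1 + 1 else st.2.2.1
  if x = y then (st.1 + 1, x, y, st.2.2.2.insert (i + 1) true) else (st.1, x, y, st.2.2.2)

-- backward loop state: (x, y, counter1); the dict is read-only here
def solBwdStep (cs : List Char) (d : PySem.Dict Int Bool) (st : Int × Int × Int) (i : Int) :
    Int × Int × Int :=
  let x := if PySem.List.pyGet? cs i = some 'x' then st.1 + 1 else st.1
  let y := if PySem.List.pyGet? cs i = some 'y' then st.2.1 + 1 else st.2.1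
  if x = y ∧ d.contains i = false then (x, y, st.2.2 + 1) else (x, y, st.2.2)

def solution (S : String) : Int :=
  let cs := S.toList
  let n : Int := PySem.Str.len S
  let fw := (PySem.List.pyRange 0 (n - 1) 1).foldl (solFwdStep cs) (0, 0, 0, PySem.Dict.empty)
  let bw := (PySem.List.pyRange (n - 1) 0 (-1)).foldl (solBwdStep cs fw.2.2.2) (0, 0, 0)
  fw.1 + bw.2.2

-- ===== PORT B =====
-- loop state: (px, py, counter)
def solAltStep (cs : List Char) (tx ty : Int) (st : Int × Int × Int) (i : Int) :
    Int × Int × Int :=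
  let ch := PySem.List.pyGet? cs (i - 1)
  let px := if ch = some 'x' then st.1 + 1 else st.1
  let py := if ch ≠ some 'x' ∧ ch = some 'y' then st.2.1 + 1 else st.2.1
  if px = py ∨ tx - px = ty - py then (px, py, st.2.2 + 1) else (px, py, st.2.2)

-- S.count('x') in Source B is ported as the corresponding list count (single-character substring)
def solution_alt (S : String) : Int :=
  let cs := S.toList
  let tx : Int := cs.count 'x'
  let ty : Int := cs.count 'y'
  let st := (PySem.List.pyRange 1 (PySem.Str.len S) 1).foldl (solAltStep cs tx ty) (0, 0, 0)
  st.2.2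

-- ===== PRECONDITION & SPEC =====
def Spec_solution (S : String) (out : Int) : Prop := out = solution_alt S
instance (S : String) (out : Int) : Decidable (Spec_solution S out) := by unfold Spec_solution; infer_instance

-- ===== CLAIM (what is proved, stated in full; the proofs are below) =====
def Claim_equal_solution : Prop := ∀ (S : String), Dom_solution S → Spec_solution S (solution S)

-- ===== LEMMAS AND PROOFS =====

-- prefix / suffix x-vs-y balance predicates at a split index
def preB (cs : List Char) (j : Nat) : Bool := (cs.take j).count 'x' == (cs.take j).count 'y'
def sufB (cs : List Char) (j : Nat) : Bool := (cs.drop j).count 'x' == (cs.drop j).count 'y'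

theorem down_succ (a : Nat) :
    (List.range (a+1)).map (fun k : Nat => ((a+1 : Nat) : Int) - (k : Int))
      = ((a+1 : Nat) : Int) :: (List.range a).map (fun k : Nat => (a : Int) - (k : Int)) := by
  rw [List.range_succ_eq_map, List.map_cons, List.map_map]
  norm_num

theorem pyRange_down (a : Nat) :
    PySem.List.pyRange (a : Int) 0 (-1) = (List.range a).map (fun k : Nat => (a : Int) - (k : Int)) := by
  rcases Nat.eq_zero_or_pos a with h | h
  · subst h; rfl
  · have h0 : (0:Int) < (a:Int) := by exact_mod_cast h
    simp only [PySem.List.pyRange]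
    rw [if_neg (by norm_num), if_neg (by norm_num), if_pos h0]
    have hc : (((a:Int) - 0 + -(-1) - 1) / -(-1)).toNat = a := by norm_num
    rw [hc]
    exact List.map_congr_left fun k _ => by ring

theorem count_take_drop (cs : List Char) (c : Char) (j : Nat) :
    (cs.take j).count c + (cs.drop j).count c = cs.count c := by
  rw [← List.count_append, List.take_append_drop]

theorem countP_or_split (p q : Nat → Bool) (L : List Nat) :
    L.countP p + L.countP (fun j => q j && !p j) = L.countP (fun j => p j || q j) := by
  induction L with
  | nil => rfl
  | cons a L ih =>
    simp only [List.countP_cons]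
    cases hp : p a <;> cases hq : q a <;> simp [hp] <;> omega

theorem fwd_inv (cs : List Char) (m : Nat) (hm : m ≤ cs.length) :
    ∃ d : PySem.Dict Int Bool,
      ((List.range m).map (fun k : Nat => (k : Int))).foldl (solFwdStep cs) (0, 0, 0, PySem.Dict.empty)
        = (((List.range' 1 m).countP (preB cs) : Int),
           ((cs.take m).count 'x' : Int), ((cs.take m).count 'y' : Int), d)
      ∧ ∀ j : Nat, d.contains (j : Int) = (decide (1 ≤ j ∧ j ≤ m) && preB cs j) := by
  induction m with
  | zero =>
    refine ⟨PySem.Dict.empty, rfl, fun j => ?_⟩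
    simp [PySem.Dict.contains_empty]; omega
  | succ m ih =>
    obtain ⟨d, heq, hd⟩ := ih (by omega)
    have hmlt : m < cs.length := by omega
    rw [List.range_succ, List.map_append, List.foldl_append, heq]
    have hget : PySem.List.pyGet? cs (m : Int) = some cs[m] := by
      rw [PySem.List.pyGet?_natCast]; simp [hmlt]
    have htake : cs.take (m+1) = cs.take m ++ [cs[m]] := by
      rw [List.take_succ]; simp [hmlt]
    have hcx : (cs.take (m+1)).count 'x'
        = (cs.take m).count 'x' + (if cs[m] = 'x' then 1 else 0) := by
      rw [htake, List.count_append]; simp [List.count_singleton]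
    have hcy : (cs.take (m+1)).count 'y'
        = (cs.take m).count 'y' + (if cs[m] = 'y' then 1 else 0) := by
      rw [htake, List.count_append]; simp [List.count_singleton]
    simp only [List.map_cons, List.map_nil, List.foldl_cons, List.foldl_nil, solFwdStep, hget]
    have hx : (if some cs[m] = some 'x' then ((cs.take m).count 'x' : Int) + 1
               else ((cs.take m).count 'x' : Int)) = ((cs.take (m+1)).count 'x' : Int) := by
      rw [hcx]; by_cases h : cs[m] = 'x' <;> simp [h]
    have hy : (if some cs[m] = some 'y' then ((cs.take m).count 'y' : Int) + 1
               else ((cs.take m).count 'y' : Int)) = ((cs.take (m+1)).count 'y' : Int) := by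
      rw [hcy]; by_cases h : cs[m] = 'y' <;> simp [h]
    simp only [hx, hy]
    have hcnt : ∀ b : Bool, preB cs (m+1) = b →
        ((List.range' 1 (m+1)).countP (preB cs) : Int)
          = ((List.range' 1 m).countP (preB cs) : Int) + (if b then 1 else 0) := by
      intro b hb
      rw [List.range'_concat, List.countP_append]
      simp [List.countP_cons, show 1 + m = m + 1 by omega, hb]
    by_cases hp : ((cs.take (m+1)).count 'x' : Int) = ((cs.take (m+1)).count 'y' : Int)
    · have hpb : preB cs (m+1) = true := by
        simp [preB]; exact_mod_cast hp
      rw [if_pos hp]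
      refine ⟨d.insert ((m : Int) + 1) true, by rw [hcnt true hpb]; simp, fun j => ?_⟩
      have : ((m : Int) + 1) = ((m+1 : Nat) : Int) := by push_cast; ring
      rw [this, PySem.Dict.contains_insert, hd j]
      by_cases hj : j = m + 1
      · subst hj; simp [hpb]
      · have : ((j : Int) == ((m+1 : Nat) : Int)) = false := by
          simp; omega
        rw [this]
        simp only [Bool.false_or]
        by_cases h1 : 1 ≤ j ∧ j ≤ m
        · have h2 : 1 ≤ j ∧ j ≤ m + 1 := ⟨h1.1, by omega⟩
          simp [h1, h2]
        · have h2 : ¬(1 ≤ j ∧ j ≤ m + 1) := by omega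
          simp [h1, h2]
    · have hpb : preB cs (m+1) = false := by
        simp only [preB, beq_eq_false_iff_ne, ne_eq, decide_eq_false_iff_not]
        exact fun h => hp (by exact_mod_cast h)
      rw [if_neg hp]
      refine ⟨d, by rw [hcnt false hpb]; simp, fun j => ?_⟩
      rw [hd j]
      by_cases hj : j = m + 1
      · subst hj; simp [hpb]
      · by_cases h1 : 1 ≤ j ∧ j ≤ m
        · have h2 : 1 ≤ j ∧ j ≤ m + 1 := ⟨h1.1, by omega⟩
          simp [h1, h2]
        · have h2 : ¬(1 ≤ j ∧ j ≤ m + 1) := by omega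
          simp [h1, h2]

theorem bwd_inv (cs : List Char) (d : PySem.Dict Int Bool)
    (hd : ∀ j : Nat, d.contains (j : Int) = (decide (1 ≤ j ∧ j ≤ cs.length - 1) && preB cs j)) :
    ∀ (a : Nat), a + 1 ≤ cs.length → ∀ c : Int,
    (((List.range a).map (fun k : Nat => (a : Int) - (k : Int))).foldl (solBwdStep cs d)
        (((cs.drop (a+1)).count 'x' : Int), ((cs.drop (a+1)).count 'y' : Int), c)).2.2
      = c + ((List.range' 1 a).countP (fun j => sufB cs j && !preB cs j) : Int) := by
  intro a
  induction a with
  | zero => intro _ c; simp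
  | succ a ih =>
    intro ha c
    have halt : a + 1 < cs.length := by omega
    rw [down_succ, List.foldl_cons]
    have hget : PySem.List.pyGet? cs ((a+1 : Nat) : Int) = some cs[a+1] := by
      rw [PySem.List.pyGet?_natCast]; simp [halt]
    have hdrop : cs.drop (a+1) = cs[a+1] :: cs.drop (a+2) := by
      rw [List.drop_eq_getElem_cons halt]
    have hcx : (cs.drop (a+1)).count 'x'
        = (cs.drop (a+2)).count 'x' + (if cs[a+1] = 'x' then 1 else 0) := by
      rw [hdrop, List.count_cons]; simp
    have hcy : (cs.drop (a+1)).count 'y'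
        = (cs.drop (a+2)).count 'y' + (if cs[a+1] = 'y' then 1 else 0) := by
      rw [hdrop, List.count_cons]; simp
    simp only [solBwdStep, hget]
    have hx : (if some cs[a+1] = some 'x' then ((cs.drop (a+2)).count 'x' : Int) + 1
               else ((cs.drop (a+2)).count 'x' : Int)) = ((cs.drop (a+1)).count 'x' : Int) := by
      rw [hcx]; by_cases h : cs[a+1] = 'x' <;> simp [h]
    have hy : (if some cs[a+1] = some 'y' then ((cs.drop (a+2)).count 'y' : Int) + 1
               else ((cs.drop (a+2)).count 'y' : Int)) = ((cs.drop (a+1)).count 'y' : Int) := by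
      rw [hcy]; by_cases h : cs[a+1] = 'y' <;> simp [h]
    simp only [hx, hy]
    have hcont : d.contains ((a+1 : Nat) : Int) = preB cs (a+1) := by
      rw [hd (a+1)]
      have : (1 ≤ a + 1 ∧ a + 1 ≤ cs.length - 1) := by omega
      simp [this]
    have hcmb : ∀ b : Bool, (sufB cs (a+1) && !preB cs (a+1)) = b →
        ((List.range' 1 (a+1)).countP (fun j => sufB cs j && !preB cs j) : Int)
          = ((List.range' 1 a).countP (fun j => sufB cs j && !preB cs j) : Int)
            + (if b then 1 else 0) := by
      intro b hb
      rw [List.range'_concat]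
      simp [List.countP_append, List.countP_cons, show 1 + a = a + 1 by omega, hb]
    by_cases hcond : ((cs.drop (a+1)).count 'x' : Int) = ((cs.drop (a+1)).count 'y' : Int)
        ∧ d.contains ((a+1 : Nat) : Int) = false
    · have hb : (sufB cs (a+1) && !preB cs (a+1)) = true := by
        have h1 : sufB cs (a+1) = true := by
          simp [sufB]; exact_mod_cast hcond.1
        have h2 : preB cs (a+1) = false := by rw [← hcont]; exact hcond.2
        simp [h1, h2]
      rw [if_pos hcond, hcmb true hb]
      have := ih (by omega) (c + 1)
      simp only [this]
      push_cast
      ring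
    · have hb : (sufB cs (a+1) && !preB cs (a+1)) = false := by
        rcases Bool.eq_false_or_eq_true (sufB cs (a+1) && !preB cs (a+1)) with h | h
        case inr => exact h
        · exfalso
          rw [Bool.and_eq_true] at h
          obtain ⟨h1, h2⟩ := h
          apply hcond
          refine ⟨?_, ?_⟩
          · simp [sufB] at h1; exact_mod_cast h1
          · rw [hcont]; simp at h2; simp [h2]
      rw [if_neg hcond, hcmb false hb]
      have := ih (by omega) c
      simp only [this]
      push_cast
      ring

theorem alt_inv (cs : List Char) :
    ∀ (k m : Nat), m + k ≤ cs.length → ∀ c : Int,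
    (((List.range' (m+1) k).map (fun j : Nat => (j : Int))).foldl
        (solAltStep cs (cs.count 'x') (cs.count 'y'))
        (((cs.take m).count 'x' : Int), ((cs.take m).count 'y' : Int), c)).2.2
      = c + ((List.range' (m+1) k).countP (fun j => preB cs j || sufB cs j) : Int) := by
  intro k
  induction k with
  | zero => intro m _ c; simp
  | succ k ih =>
    intro m hmk c
    have hmlt : m < cs.length := by omega
    rw [List.range'_succ, List.map_cons, List.foldl_cons]
    have hget : PySem.List.pyGet? cs (((m+1 : Nat) : Int) - 1) = some cs[m] := by
      have : ((m+1 : Nat) : Int) - 1 = ((m : Nat) : Int) := by push_cast; ring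
      rw [this, PySem.List.pyGet?_natCast]; simp [hmlt]
    have htake : cs.take (m+1) = cs.take m ++ [cs[m]] := by
      rw [List.take_succ]; simp [hmlt]
    have hcx : (cs.take (m+1)).count 'x'
        = (cs.take m).count 'x' + (if cs[m] = 'x' then 1 else 0) := by
      rw [htake, List.count_append]; simp [List.count_singleton]
    have hcy : (cs.take (m+1)).count 'y'
        = (cs.take m).count 'y' + (if cs[m] = 'y' then 1 else 0) := by
      rw [htake, List.count_append]; simp [List.count_singleton]
    simp only [solAltStep, hget]
    have hx : (if some cs[m] = some 'x' then ((cs.take m).count 'x' : Int) + 1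
               else ((cs.take m).count 'x' : Int)) = ((cs.take (m+1)).count 'x' : Int) := by
      rw [hcx]; by_cases h : cs[m] = 'x' <;> simp [h]
    have hy : (if ¬ some cs[m] = some 'x' ∧ some cs[m] = some 'y'
                then ((cs.take m).count 'y' : Int) + 1
               else ((cs.take m).count 'y' : Int)) = ((cs.take (m+1)).count 'y' : Int) := by
      rw [hcy]; by_cases h : cs[m] = 'y'
      · have hne : ¬ cs[m] = 'x' := by rw [h]; decide
        simp [h, hne]
      · simp [h]
    simp only [ne_eq, hx, hy]
    have hsufx : ((cs.count 'x' : Int)) - ((cs.take (m+1)).count 'x' : Int)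
        = ((cs.drop (m+1)).count 'x' : Int) := by
      have := count_take_drop cs 'x' (m+1); push_cast [← this]; ring
    have hsufy : ((cs.count 'y' : Int)) - ((cs.take (m+1)).count 'y' : Int)
        = ((cs.drop (m+1)).count 'y' : Int) := by
      have := count_take_drop cs 'y' (m+1); push_cast [← this]; ring
    by_cases hcond : ((cs.take (m+1)).count 'x' : Int) = ((cs.take (m+1)).count 'y' : Int)
        ∨ (cs.count 'x' : Int) - ((cs.take (m+1)).count 'x' : Int)
          = (cs.count 'y' : Int) - ((cs.take (m+1)).count 'y' : Int)
    · have hb : (preB cs (m+1) || sufB cs (m+1)) = true := by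
        rcases hcond with h | h
        · have : preB cs (m+1) = true := by simp [preB]; exact_mod_cast h
          simp [this]
        · rw [hsufx, hsufy] at h
          have : sufB cs (m+1) = true := by simp [sufB]; exact_mod_cast h
          simp [this]
      rw [if_pos hcond, ih (m+1) (by omega) (c+1)]
      simp [List.countP_cons, hb]
      ring
    · have hb : (preB cs (m+1) || sufB cs (m+1)) = false := by
        rcases Bool.eq_false_or_eq_true (preB cs (m+1) || sufB cs (m+1)) with h | h
        case inr => exact h
        exfalso
        rw [Bool.or_eq_true] at h
        apply hcond
        rcases h with h | h
        · left
          simp [preB] at h; exact_mod_cast h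
        · right
          rw [hsufx, hsufy]
          simp [sufB] at h; exact_mod_cast h
      rw [if_neg hcond, ih (m+1) (by omega) c]
      simp [List.countP_cons, hb]

theorem solution_eq_alt (S : String) : solution S = solution_alt S := by
  unfold solution solution_alt
  have hlen : PySem.Str.len S = (S.toList.length : Int) := by
    simp [PySem.Str.len_eq]
  rcases Nat.eq_zero_or_pos S.toList.length with h0 | h1
  · simp only [hlen, h0]
    norm_num [PySem.List.pyRange]
  · have hfw : PySem.List.pyRange 0 ((S.toList.length : Int) - 1) 1
        = (List.range (S.toList.length - 1)).map (fun k : Nat => (k : Int)) := by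
      rw [PySem.List.pyRange_one]
      have : (((S.toList.length : Int) - 1) - 0).toNat = S.toList.length - 1 := by omega
      rw [this]
      exact List.map_congr_left fun k _ => by simp
    have hbw : PySem.List.pyRange ((S.toList.length : Int) - 1) 0 (-1)
        = (List.range (S.toList.length - 1)).map
            (fun k : Nat => ((S.toList.length - 1 : Nat) : Int) - (k : Int)) := by
      have : ((S.toList.length : Int) - 1) = ((S.toList.length - 1 : Nat) : Int) := by omega
      rw [this, pyRange_down]
    have halt : PySem.List.pyRange 1 (S.toList.length : Int) 1
        = (List.range' 1 (S.toList.length - 1)).map (fun j : Nat => (j : Int)) := by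
      rw [PySem.List.pyRange_one, List.range'_eq_map_range, List.map_map]
      have : ((S.toList.length : Int) - 1).toNat = S.toList.length - 1 := by omega
      rw [this]
      exact List.map_congr_left fun k _ => by simp
    obtain ⟨d, heq, hd⟩ := fwd_inv S.toList (S.toList.length - 1) (by omega)
    have hd' : ∀ j : Nat, d.contains (j : Int)
        = (decide (1 ≤ j ∧ j ≤ S.toList.length - 1) && preB S.toList j) := hd
    have hb := bwd_inv S.toList d hd' (S.toList.length - 1) (by omega) 0
    have hdrop : S.toList.length - 1 + 1 = S.toList.length := by omega
    rw [hdrop, List.drop_length] at hb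
    simp only [List.count_nil, Nat.cast_zero] at hb
    have ha := alt_inv S.toList (S.toList.length - 1) 0 (by omega) 0
    simp only [List.take_zero, List.count_nil, Nat.cast_zero, Nat.zero_add] at ha
    simp only [hlen, hfw, hbw, halt, heq, hb, ha]
    have hsplit := countP_or_split (preB S.toList) (sufB S.toList)
      (List.range' 1 (S.toList.length - 1))
    push_cast [← hsplit]
    ring

-- ===== VERDICT (by name: the statement is the Claim_ definition above) =====
theorem solution_spec : Claim_equal_solution := by
  intro S _
  unfold Spec_solution
  exact solution_eq_alt S
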